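-- pv_equiv track=rewrite | github.com/Xingyu-Romantic/Text-Summarization-Based-On-Bart | task/unit_test.py | post_process_seq
-- ===== SOURCE A (Python) =====
-- def post_process_seq(seq,
--                         bos_idx = 101,
--                         eos_idx = 102,
--                         output_bos=False,
--                         output_eos=False):
--     """
--     Post-process the decoded sequence.
--     """
--     seq = seq[0]
--     eos_pos = len(seq) - 1
--     for i, idx in enumerate(seq):
--         if idx == eos_idx:
--             eos_pos = i
--             break
--     seq = [
--         idx for idx in seq[:eos_pos + 1]
--         if (output_bos or idx != bos_idx) and (output_eos or idx != eos_idx)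
--     ]
--
--     return seq
-- ===== SOURCE B (Python) =====
-- def post_process_seq(seq,
--                      bos_idx=101,
--                      eos_idx=102,
--                      output_bos=False,
--                      output_eos=False):
--     """Single pass: filter special tokens on the fly and stop right after eos."""
--     out = []
--     for tok in seq[0]:
--         if (output_bos or tok != bos_idx) and (output_eos or tok != eos_idx):
--             out.append(tok)
--         if tok == eos_idx:
--             break
--     return out
-- ===== Notes on version B (the rewrite author's own statement) =====
-- stated objective: simpler
-- what changed: Replaces A's two-phase scheme (enumerate-scan for the eos position, then a filtering comprehension over the slice) with one loop that filters tokens as it goes and breaks right after the eos token.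
import Mathlib
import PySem

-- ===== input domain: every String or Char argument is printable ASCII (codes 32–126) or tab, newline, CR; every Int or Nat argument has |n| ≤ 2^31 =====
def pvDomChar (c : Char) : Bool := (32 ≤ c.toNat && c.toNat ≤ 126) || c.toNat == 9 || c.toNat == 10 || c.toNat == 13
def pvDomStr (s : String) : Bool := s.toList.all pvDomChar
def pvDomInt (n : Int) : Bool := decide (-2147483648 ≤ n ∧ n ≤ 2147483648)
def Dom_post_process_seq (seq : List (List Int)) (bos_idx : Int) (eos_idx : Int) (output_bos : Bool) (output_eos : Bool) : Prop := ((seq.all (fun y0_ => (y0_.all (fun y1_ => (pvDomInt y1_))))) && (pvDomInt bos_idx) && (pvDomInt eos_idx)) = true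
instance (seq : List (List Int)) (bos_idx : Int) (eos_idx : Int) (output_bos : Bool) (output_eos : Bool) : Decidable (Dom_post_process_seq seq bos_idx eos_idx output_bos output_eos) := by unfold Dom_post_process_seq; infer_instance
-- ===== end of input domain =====

-- B replaces A's two-phase scheme (scan for the eos position, then filter a slice)
-- with one loop that filters as it goes and breaks right after eos (objective: simpler).


-- ===== PORT A =====
-- A's 'for i, idx in enumerate(seq): if idx == eos_idx: eos_pos = i; break'
-- with fallback eos_pos = len(seq)-1:
def pvFindEos (s : List Int) (eos_idx : Int) (i : Nat) (fb : Nat) : Nat :=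
  match s with
  | [] => fb
  | x :: xs => if x == eos_idx then i else pvFindEos xs eos_idx (i + 1) fb

def post_process_seq (seq : List (List Int)) (bos_idx : Int) (eos_idx : Int) (output_bos : Bool) (output_eos : Bool) : List Int :=
  match seq with
  | [] => []  -- Python raises IndexError on seq[0]; excluded by Pre_
  | s :: _ =>
    let eos_pos : Nat := pvFindEos s eos_idx 0 (s.length - 1)
    -- seq[:eos_pos+1] with a nonnegative bound is List.take (eos_pos+1); then the comprehension's filter
    (s.take (eos_pos + 1)).filter
      (fun idx => (output_bos || idx != bos_idx) && (output_eos || idx != eos_idx))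

-- ===== PORT B =====
-- B's single loop: keep the token if it passes the filter, and break right after eos.
def pvAltLoop (bos_idx eos_idx : Int) (output_bos output_eos : Bool) : List Int → List Int
  | [] => []
  | t :: ts =>
    let tail := if t == eos_idx then [] else pvAltLoop bos_idx eos_idx output_bos output_eos ts
    if (output_bos || t != bos_idx) && (output_eos || t != eos_idx) then t :: tail else tail

def post_process_seq_alt (seq : List (List Int)) (bos_idx : Int) (eos_idx : Int) (output_bos : Bool) (output_eos : Bool) : List Int :=
  match seq with
  | [] => []  -- seq[0] raises here too; excluded by Pre_
  | s :: _ => pvAltLoop bos_idx eos_idx output_bos output_eos s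

-- ===== PRECONDITION & SPEC =====
-- Pre_ excludes only the empty outer list, on which A raises IndexError at seq[0].
def Pre_post_process_seq (seq : List (List Int)) (bos_idx : Int) (eos_idx : Int) (output_bos : Bool) (output_eos : Bool) : Prop := seq ≠ []
instance (seq : List (List Int)) (bos_idx : Int) (eos_idx : Int) (output_bos : Bool) (output_eos : Bool) : Decidable (Pre_post_process_seq seq bos_idx eos_idx output_bos output_eos) := by unfold Pre_post_process_seq; infer_instance
def pvWitness_post_process_seq : List (List Int) × Int × Int × Bool × Bool := ([[101, 5, 102, 7]], 101, 102, false, false)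

def Spec_post_process_seq (seq : List (List Int)) (bos_idx : Int) (eos_idx : Int) (output_bos : Bool) (output_eos : Bool) (out : List Int) : Prop := out = post_process_seq_alt seq bos_idx eos_idx output_bos output_eos
instance (seq : List (List Int)) (bos_idx : Int) (eos_idx : Int) (output_bos : Bool) (output_eos : Bool) (out : List Int) : Decidable (Spec_post_process_seq seq bos_idx eos_idx output_bos output_eos out) := by unfold Spec_post_process_seq; infer_instance

-- ===== CLAIM =====
def Claim_equal_post_process_seq : Prop := ∀ (seq : List (List Int)) (bos_idx : Int) (eos_idx : Int) (output_bos : Bool) (output_eos : Bool), Dom_post_process_seq seq bos_idx eos_idx output_bos output_eos → Pre_post_process_seq seq bos_idx eos_idx output_bos output_eos → Spec_post_process_seq seq bos_idx eos_idx output_bos output_eos (post_process_seq seq bos_idx eos_idx output_bos output_eos)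

-- ===== LEMMAS AND PROOFS =====

-- The prefix A's slice produces: everything up to and including the first eos (or all of s).
def pvTakeThru (eos_idx : Int) : List Int → List Int
  | [] => []
  | t :: ts => t :: (if t == eos_idx then [] else pvTakeThru eos_idx ts)

theorem pvFindEos_notMem (eos_idx : Int) (s : List Int) (h : eos_idx ∉ s) :
    ∀ i fb, pvFindEos s eos_idx i fb = fb := by
  induction s with
  | nil => intro i fb; rfl
  | cons x xs ih =>
    intro i fb
    simp only [List.mem_cons, not_or] at h
    have hx : ¬ x = eos_idx := fun e => h.1 e.symm
    simp [pvFindEos, hx, ih h.2]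

theorem pvFindEos_mem (eos_idx : Int) (s : List Int) (h : eos_idx ∈ s) :
    ∀ i fb fb', pvFindEos s eos_idx (i + 1) fb = pvFindEos s eos_idx i fb' + 1 := by
  induction s with
  | nil => cases h
  | cons x xs ih =>
    intro i fb fb'
    by_cases hx : x = eos_idx
    · simp [pvFindEos, hx]
    · have hmem : eos_idx ∈ xs := by
        rcases List.mem_cons.mp h with h1 | h1
        · exact absurd h1.symm hx
        · exact h1
      simp only [pvFindEos, hx, beq_iff_eq]
      exact ih hmem (i + 1) fb fb'

theorem take_findEos (eos_idx : Int) (s : List Int) :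
    s.take (pvFindEos s eos_idx 0 (s.length - 1) + 1) = pvTakeThru eos_idx s := by
  induction s with
  | nil => rfl
  | cons t ts ih =>
    by_cases ht : t = eos_idx
    · simp [pvFindEos, pvTakeThru, ht]
    · simp only [pvFindEos, pvTakeThru, ht, beq_iff_eq]
      simp only [List.length_cons, Nat.add_sub_cancel]
      by_cases hmem : eos_idx ∈ ts
      · rw [pvFindEos_mem eos_idx ts hmem 0 ts.length (ts.length - 1)]
        simp [List.take_succ_cons, ih]
      · rw [pvFindEos_notMem eos_idx ts hmem]
        cases ts with
        | nil => simp [pvTakeThru]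
        | cons u us =>
          rw [pvFindEos_notMem eos_idx (u :: us) hmem] at ih
          simp only [List.length_cons, Nat.add_sub_cancel] at ih
          simp [List.take_succ_cons, ih]

theorem altLoop_eq_filter_takeThru (bos_idx eos_idx : Int) (ob oe : Bool) (s : List Int) :
    pvAltLoop bos_idx eos_idx ob oe s
      = (pvTakeThru eos_idx s).filter (fun idx => (ob || idx != bos_idx) && (oe || idx != eos_idx)) := by
  induction s with
  | nil => rfl
  | cons t ts ih =>
    cases hk : ((ob || t != bos_idx) && (oe || t != eos_idx)) <;>
      by_cases ht : t = eos_idx <;>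
        simp [pvAltLoop, pvTakeThru, ht, hk, ih, List.filter_cons]

-- ===== VERDICT =====
theorem post_process_seq_spec : Claim_equal_post_process_seq := by
  intro seq bos_idx eos_idx ob oe _ hpre
  unfold Spec_post_process_seq post_process_seq post_process_seq_alt
  cases seq with
  | nil => exact absurd rfl hpre
  | cons s _ =>
    simp only [take_findEos, altLoop_eq_filter_takeThru]
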